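-- pv_equiv track=rewrite | github.com/adam-gyenge/ECOPY_23241 | src/weekly/weekly_test_1.py | sort_list_by_divisibility
-- ===== SOURCE A (Python) =====
-- def sort_list_by_divisibility(input_list):
--     by_2 = []
--     by_5 = []
--     by_25 = []
--     by_none = []
--     my_dict = {}
--     for i in input_list:
--         if i % 2 == 0 and i % 5 == 0:
--             by_25.append(i)
--         elif i % 2 == 0:
--             by_2.append(i)
--         elif i % 5 == 0:
--             by_5.append(i)
--         else:
--             by_none.append(i)
--     my_dict['by_two'] = by_2
--     my_dict['by_five'] = by_5
--     my_dict['by_two_and_five'] = by_25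
--     my_dict['by_none'] = by_none
--     return my_dict
-- ===== SOURCE B (Python) =====
-- def sort_list_by_divisibility(input_list):
--     evens = [i for i in input_list if i % 2 == 0]
--     odds = [i for i in input_list if i % 2 != 0]
--     return {
--         'by_two': [i for i in evens if i % 5 != 0],
--         'by_five': [i for i in odds if i % 5 == 0],
--         'by_two_and_five': [i for i in evens if i % 5 == 0],
--         'by_none': [i for i in odds if i % 5 != 0],
--     }
-- ===== Notes on version B (the rewrite author's own statement) =====
-- stated objective: alternative
-- what changed: Replaces the single accumulating loop with mutually-exclusive branches by a two-level partition: first split the list into evens and odds by parity, then split each half by divisibility by 5, assembling the dict directly from the four filters.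
import Mathlib
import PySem

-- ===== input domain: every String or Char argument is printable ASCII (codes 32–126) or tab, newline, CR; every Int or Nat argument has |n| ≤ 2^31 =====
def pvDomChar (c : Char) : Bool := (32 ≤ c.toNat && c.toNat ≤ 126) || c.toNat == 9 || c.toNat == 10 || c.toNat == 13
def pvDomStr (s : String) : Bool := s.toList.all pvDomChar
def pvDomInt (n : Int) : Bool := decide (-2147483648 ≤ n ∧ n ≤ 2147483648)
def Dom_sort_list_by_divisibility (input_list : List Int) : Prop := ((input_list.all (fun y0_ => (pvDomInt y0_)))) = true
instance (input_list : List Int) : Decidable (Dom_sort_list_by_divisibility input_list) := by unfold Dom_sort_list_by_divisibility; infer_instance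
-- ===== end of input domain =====

-- B replaces A's single accumulating loop with mutually exclusive branches by a two-level
-- partition (parity first, then divisibility by 5 inside each half); same output ("alternative").

-- ===== PORT A =====
-- the loop body: four accumulators, mutually exclusive branches, in A's branch order
def pvStepA (st : List Int × List Int × List Int × List Int) (i : Int) :
    List Int × List Int × List Int × List Int :=
  if PySem.Int.mod i 2 == 0 && PySem.Int.mod i 5 == 0 then (st.1, st.2.1, st.2.2.1 ++ [i], st.2.2.2)
  else if PySem.Int.mod i 2 == 0 then (st.1 ++ [i], st.2.1, st.2.2.1, st.2.2.2)
  else if PySem.Int.mod i 5 == 0 then (st.1, st.2.1 ++ [i], st.2.2.1, st.2.2.2)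
  else (st.1, st.2.1, st.2.2.1, st.2.2.2 ++ [i])

-- one pass over the list, then the dict in A's insertion order
def sort_list_by_divisibility (input_list : List Int) : List (String × List Int) :=
  let st := input_list.foldl pvStepA ([], [], [], [])
  [("by_two", st.1), ("by_five", st.2.1), ("by_two_and_five", st.2.2.1), ("by_none", st.2.2.2)]

-- ===== PORT B =====
-- two-level partition: evens/odds by parity, then each half split by divisibility by 5
def sort_list_by_divisibility_alt (input_list : List Int) : List (String × List Int) :=
  let evens := input_list.filter (fun i => PySem.Int.mod i 2 == 0)
  let odds := input_list.filter (fun i => !(PySem.Int.mod i 2 == 0))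
  [("by_two", evens.filter (fun i => !(PySem.Int.mod i 5 == 0))),
   ("by_five", odds.filter (fun i => PySem.Int.mod i 5 == 0)),
   ("by_two_and_five", evens.filter (fun i => PySem.Int.mod i 5 == 0)),
   ("by_none", odds.filter (fun i => !(PySem.Int.mod i 5 == 0)))]

-- ===== PRECONDITION & SPEC =====
def Spec_sort_list_by_divisibility (input_list : List Int) (out : List (String × List Int)) : Prop := out = sort_list_by_divisibility_alt input_list
instance (input_list : List Int) (out : List (String × List Int)) : Decidable (Spec_sort_list_by_divisibility input_list out) := by unfold Spec_sort_list_by_divisibility; infer_instance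

-- ===== CLAIM (what is proved, stated in full; the proofs are below) =====
def Claim_equal_sort_list_by_divisibility : Prop := ∀ (input_list : List Int), Dom_sort_list_by_divisibility input_list → Spec_sort_list_by_divisibility input_list (sort_list_by_divisibility input_list)

-- ===== LEMMAS AND PROOFS =====

-- loop invariant: A's fold extends each accumulator by the matching filter of the remaining list
theorem pv_loop_inv (l : List Int) (b2 b5 b25 bn : List Int) :
    l.foldl pvStepA (b2, b5, b25, bn)
    = (b2 ++ l.filter (fun i => PySem.Int.mod i 2 == 0 && !(PySem.Int.mod i 5 == 0)),
       b5 ++ l.filter (fun i => !(PySem.Int.mod i 2 == 0) && PySem.Int.mod i 5 == 0),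
       b25 ++ l.filter (fun i => PySem.Int.mod i 2 == 0 && PySem.Int.mod i 5 == 0),
       bn ++ l.filter (fun i => !(PySem.Int.mod i 2 == 0) && !(PySem.Int.mod i 5 == 0))) := by
  induction l generalizing b2 b5 b25 bn with
  | nil => simp
  | cons x xs ih =>
    rw [List.foldl_cons]
    by_cases h2 : PySem.Int.mod x 2 == 0 <;> by_cases h5 : PySem.Int.mod x 5 == 0 <;>
      rw [show pvStepA (b2, b5, b25, bn) x =
            (if (PySem.Int.mod x 2 == 0 && PySem.Int.mod x 5 == 0 : Bool) then (b2, b5, b25 ++ [x], bn)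
             else if (PySem.Int.mod x 2 == 0 : Bool) then (b2 ++ [x], b5, b25, bn)
             else if (PySem.Int.mod x 5 == 0 : Bool) then (b2, b5 ++ [x], b25, bn)
             else (b2, b5, b25, bn ++ [x])) from rfl] <;>
      simp only [h2, h5, Bool.and_true, Bool.and_false,
        Bool.and_self, Bool.not_true, Bool.not_false, Bool.false_eq_true, if_true, if_false,
        ih, List.filter_cons] <;>
      simp [List.append_assoc]

theorem sort_list_by_divisibility_eq (l : List Int) :
    sort_list_by_divisibility l = sort_list_by_divisibility_alt l := by
  unfold sort_list_by_divisibility sort_list_by_divisibility_alt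
  simp only [pv_loop_inv, List.filter_filter, List.nil_append]
  have hc : ∀ (p q : Int → Bool), l.filter (fun i => p i && q i) = l.filter (fun i => q i && p i) :=
    fun p q => List.filter_congr (fun a _ => Bool.and_comm (p a) (q a))
  rw [hc (fun i => PySem.Int.mod i 2 == 0) (fun i => !(PySem.Int.mod i 5 == 0)),
      hc (fun i => !(PySem.Int.mod i 2 == 0)) (fun i => PySem.Int.mod i 5 == 0),
      hc (fun i => PySem.Int.mod i 2 == 0) (fun i => PySem.Int.mod i 5 == 0),
      hc (fun i => !(PySem.Int.mod i 2 == 0)) (fun i => !(PySem.Int.mod i 5 == 0))]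

-- ===== VERDICT (by name: the statement is the Claim_ definition above) =====
theorem sort_list_by_divisibility_spec : Claim_equal_sort_list_by_divisibility := by
  intro l _
  unfold Spec_sort_list_by_divisibility
  exact sort_list_by_divisibility_eq l
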